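/- GENERATED by mk_final_copies.py from the proof of the farm's unit `stb_vorbis_open_memory` (farm:stb_vorbis_open_memory.2: Proof.lean) as the
   re-elaboration sweep compiled it — do not edit. -/
import Asan.CheckWalk
import Vorbis.Spec.TopCheck
import Vorbis.Spec.TopIface
import Vorbis.Spec.StartDecoderB
import Vorbis.Spec.Units.stb_vorbis_open_memory
import Vorbis.Spec.Worked.stb_vorbis_open_memory_Lemmas

open X86 X86.User Asan Vorbis Vorbis.Spec

namespace Vorbis.Spec.stb_vorbis_open_memory

set_option maxRecDepth 10000
set_option maxHeartbeats 4000000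

/-- memcpy's postcondition about its target, as the invariant's `Copied`: the 1808 bytes at `f'` in `m2` are those at `p` in `m1`. -/
theorem om_copied (spw fw : Word) (m1 m2 : Mem) (h1 : 0x700000 + 6208 ≤ spw.toNat) (h2 : spw.toNat + 8 ≤ 0x800000)
    (hcopy : ∀ i, i < 1808 → m2.readLE (fw + UInt64.ofNat i) 1 = m1.readLE (spw - 1976 + UInt64.ofNat i) 1) :
    Copied m1 (spw.toNat - 1976) m2 fw.toNat Off.sizeof.stb_vorbis := by
  intro o ho
  simp only [voff] at ho
  have ea : addr (fw.toNat + o) = fw + UInt64.ofNat o := by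
    rw [← addr_add, addr_toNat]
  have eb : addr (spw.toNat - 1976 + o) = spw - 1976 + UInt64.ofNat o := by
    rw [← addr_add]
    congr 1
    apply UInt64.toNat_inj.mp
    rw [toNat_addr _ (by omega)]
    u_omega
  have hc := hcopy o ho
  rw [om_readLE1, om_readLE1, ← ea, ← eb] at hc
  exact UInt8.toNat_inj.mp hc

/-- Every block the configuration reads at SD.12 is an arena block below `B + S`: vorbis_alloc and the copy keep it. -/
theorem om_reads_kept (frames' : List (Nat × FrameLayout)) (len : Nat) (spw fw : Word) (A : Arena × List Obj) (mem0 m1 m2 : Mem)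
    (h1 : 0x700000 + 6208 ≤ spw.toNat) (h2 : spw.toNat + 8 ≤ 0x800000)
    (hext : (⟨0x800000, 0x400000, 0, 0x400000, [], []⟩ : Arena).Extends A.1)
    (hdone : StartDecoder.Done len (spw.toNat - 1976) (Asan.Live (stackObjs frames' ++ A.2)) A mem0)
    (hfw : fw.toNat = 0x800000 + A.1.S + 32)
    (hY : Mem.SameExcept [⟨spw.toNat - 6208, spw.toNat - 2024⟩, ⟨spw.toNat - 1976 + 8, spw.toNat - 1976 + 12⟩,
      ⟨spw.toNat - 1976 + 128, spw.toNat - 1976 + 132⟩, ⟨0xC00000, 0xE00000⟩] mem0 m1)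
    (hZ : Mem.SameExcept [⟨spw.toNat - 6208, spw.toNat - 2024⟩, ⟨fw.toNat, fw.toNat + 1808⟩] m1 m2) :
    ∀ B, A.1.Blk B → B.Kept mem0 m2 := by
  have hAB : A.1.B = 0x800000 := hext.B
  have hAL : A.1.L = 0x400000 := hext.L
  have hAR2 := hdone.arena.AR2
  intro B hb
  have hr := hdone.arena.block_range hb
  have hl := le_r8 B.size
  refine Block.Kept.trans (Block.Kept.of_sameExcept hY ?_ (by omega)) (Block.Kept.of_sameExcept hZ ?_ (by omega))
  · intro w hw
    simp only [List.mem_cons, List.not_mem_nil, or_false] at hw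
    rcases hw with rfl | rfl | rfl | rfl <;> simp only [] <;> omega
  · intro w hw
    simp only [List.mem_cons, List.not_mem_nil, or_false] at hw
    rcases hw with rfl | rfl <;> simp only [] <;> omega

/-- SH7 (`Consts`) over vorbis_alloc and the copy: the two tables of the image lie below every window. -/
theorem om_consts2 (spw fw : Word) (S : Nat) (mem0 m1 m2 : Mem) (h : Consts mem0)
    (h1 : 0x700000 + 6208 ≤ spw.toNat)
    (hfw : fw.toNat = 0x800000 + S + 32)
    (hY : Mem.SameExcept [⟨spw.toNat - 6208, spw.toNat - 2024⟩, ⟨spw.toNat - 1976 + 8, spw.toNat - 1976 + 12⟩,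
      ⟨spw.toNat - 1976 + 128, spw.toNat - 1976 + 132⟩, ⟨0xC00000, 0xE00000⟩] mem0 m1)
    (hZ : Mem.SameExcept [⟨spw.toNat - 6208, spw.toNat - 2024⟩, ⟨fw.toNat, fw.toNat + 1808⟩] m1 m2) : Consts m2 := by
  refine h.kept ?_ ?_
  · refine Block.Kept.trans (Block.Kept.of_sameExcept hY ?_ (by decide)) (Block.Kept.of_sameExcept hZ ?_ (by decide))
    · intro w hw
      simp only [List.mem_cons, List.not_mem_nil, or_false] at hw
      rcases hw with rfl | rfl | rfl | rfl <;> simp only [Vorbis.Globals.log2_4] <;> omega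
    · intro w hw
      simp only [List.mem_cons, List.not_mem_nil, or_false] at hw
      rcases hw with rfl | rfl <;> simp only [Vorbis.Globals.log2_4] <;> omega
  · refine Block.Kept.trans (Block.Kept.of_sameExcept hY ?_ (by decide)) (Block.Kept.of_sameExcept hZ ?_ (by decide))
    · intro w hw
      simp only [List.mem_cons, List.not_mem_nil, or_false] at hw
      rcases hw with rfl | rfl | rfl | rfl <;> simp only [Vorbis.Globals.range_list] <;> omega
    · intro w hw
      simp only [List.mem_cons, List.not_mem_nil, or_false] at hw
      rcases hw with rfl | rfl <;> simp only [Vorbis.Globals.range_list] <;> omega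

/-- **SD.12 → P5 → the decode-time invariant of the arena copy** (`OmPure`, the pure part of the unit): every field of
`DecodeInv` for `(m2, f')`, from start_decoder's success state about `(mem0, p)`, vorbis_alloc's post and memcpy's post. -/
theorem om_pure : OmPure := by
  intro frames' len spw fw A mem0 m1 m2 hlen hsp1 hsp2 hsp8 hcon hext hhand hdone hfw hfits harena1 hY hcopy hZ hinv3
  have hAB : A.1.B = 0x800000 := hext.B
  have hAL : A.1.L = 0x400000 := hext.L
  have hAR2 := hdone.arena.AR2
  have hTL : A.1.T = A.1.L := hdone.arena.T_eq_L_of_nil hdone.noTemps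
  have hextP : A.1.Extends (A.1.pushSetup Off.sizeof.stb_vorbis) := A.1.extends_pushSetup _
  -- the configuration and `VorbisOK` of the copy (the head start of the earlier attempt)
  obtain ⟨he, hcfg⟩ := om_config_moved frames' len spw fw A mem0 m1 m2 hsp1 hsp2 hext hdone hfw hY hcopy hZ
  have hvorb := om_vorbis_moved len (spw.toNat - 1976) fw.toNat A mem0 m2 hext hdone hfw he hcfg
  have hcop := om_copied spw fw m1 m2 hsp1 hsp2 hcopy
  have hkept := om_reads_kept frames' len spw fw A mem0 m1 m2 hsp1 hsp2 hext hdone hfw hY hZ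
  have hk : ∀ B, ConfigOK.Reads mem0 (spw.toNat - 1976) B → B.Kept mem0 m2 := fun B hR => hkept B (hdone.reads_arena hR)
  -- the copy is a setup block of the new arena
  have hself : (A.1.pushSetup Off.sizeof.stb_vorbis).Blk (objBlock fw.toNat) := by
    have := A.1.blk_pushSetup Off.sizeof.stb_vorbis
    rw [hAB] at this
    rw [hfw]
    exact this
  -- the arena layer of the copy
  have harena2 : ArenaOK (A.1.pushSetup Off.sizeof.stb_vorbis) (A.1.newSetupObj Off.sizeof.stb_vorbis :: A.2) m2 fw.toNat :=
    harena1.transfer (ObjEq.of_copied hcop (by decide))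
  have etmr : stb_vorbis.temp_memory_required m2 fw.toNat = stb_vorbis.temp_memory_required mem0 (spw.toNat - 1976) := by
    simp only [vacc, voff]
    exact he.u32 12 (by decide)
  have hado : ADO (A.1.pushSetup Off.sizeof.stb_vorbis) (A.1.newSetupObj Off.sizeof.stb_vorbis :: A.2) m2 fw.toNat := by
    refine ADO.of_vorbis_alloc harena2 hdone.noTemps hTL ?_ ?_
    · exact T1.mod8 hvorb.config.temp (by have := hvorb.hd3.b1.facts; omega)
    · have hfin := hdone.final.fits
      rw [hdone.arena.AR5.setup, hdone.arena.AR5.temp] at hfin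
      rw [etmr]
      simp only [voff]
      unfold tmr at hfin
      omega
  -- the hand-over carrier
  have hand1 : Hand (A.1.newSetupObj Off.sizeof.stb_vorbis :: A.2) frames' len (A.1.pushSetup Off.sizeof.stb_vorbis)
      (spw.toNat - 1976) :=
    hhand.toHand.mono hextP (fun o ho => List.mem_cons_of_mem _ ho) (fun _ ho => ho)
  have hand2 := DecodeInv.hand_of_arenaBlk hand1 harena2 hself
  -- the environment
  have hok : BlkOK (RunBlk (A.1.pushSetup Off.sizeof.stb_vorbis) len) := hand1.runBlk_ok harena1 hlen
  have hlive : BlkLive (RunBlk (A.1.pushSetup Off.sizeof.stb_vorbis) len)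
      (LiveSet (A.1.newSetupObj Off.sizeof.stb_vorbis :: A.2) frames') := by
    refine harena1.runBlk_live (fun o ho => List.mem_append_right _ ho) ?_
    intro B hB
    refine (hdone.env.live B (runBlk_extra (List.mem_cons_of_mem _ hB))).mono ?_
    intro x hx
    obtain ⟨o, ho, hb⟩ := hx
    refine ⟨o, ?_, hb⟩
    rcases List.mem_append.mp ho with hs | hoth
    · exact List.mem_append_left _ hs
    · exact List.mem_append_right _ (List.mem_cons_of_mem _ hoth)
  have henv : Env (RunBlk (A.1.pushSetup Off.sizeof.stb_vorbis) len)
      (LiveSet (A.1.newSetupObj Off.sizeof.stb_vorbis :: A.2) frames') m2 := ⟨hinv3.shadow.covers, hok, hlive⟩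
  -- a block of the new arena at a `finalY[c]` is a block of the old one: the new block lies behind every old block
  have hfy : ∀ (c sz : Nat), (c : Int) < stb_vorbis.channels mem0 (spw.toNat - 1976) →
      RunBlk (A.1.pushSetup Off.sizeof.stb_vorbis) len ⟨stb_vorbis.finalY mem0 (spw.toNat - 1976) c, sz⟩ →
      StartDecoder.blk len (spw.toNat - 1976) A ⟨stb_vorbis.finalY mem0 (spw.toNat - 1976) c, sz⟩ := by
    intro c sz hc hb
    rcases hb with hs | hx
    · obtain ⟨o, ho, hp⟩ := hs
      rcases List.mem_append.mp ho with hold | hnew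
      · exact runBlk_setup ⟨o, hold, hp⟩
      · exfalso
        obtain ⟨sz', hb', _⟩ := hdone.config_arena.finalY c hc
        have hr := hdone.arena.block_range hb'
        have e := List.mem_singleton.mp hnew
        have e1 : o = A.1.S + 32 := congrArg Prod.fst e
        have hp' : stb_vorbis.finalY mem0 (spw.toNat - 1976) c = A.1.B + o := hp
        simp only [] at hr
        omega
    · exact runBlk_extra (List.mem_cons_of_mem _ hx)
  -- the copy is disjoint from every block allocated before
  have hobj : ∀ B, StartDecoder.blk len (spw.toNat - 1976) A B → B ≠ objBlock (spw.toNat - 1976) →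
      B.disjoint (objBlock fw.toNat) := by
    intro B hB hne
    have hfit : A.1.S + 32 + r8 Off.sizeof.stb_vorbis ≤ A.1.T := hfits
    have hl8 := le_r8 Off.sizeof.stb_vorbis
    simp only [voff] at hfit hl8
    rcases hB with hs | hx
    · have hr := hdone.arena.block_range hs
      have hl := le_r8 B.size
      simp only [vblock, voff]
      omega
    · rcases List.mem_cons.mp hx with rfl | hm
      · exact absurd rfl hne
      · have ho := hhand.outside B hm
        simp only [vblock, voff]
        omega
  have hsep : Separated (RunBlk (A.1.pushSetup Off.sizeof.stb_vorbis) len) m2 fw.toNat :=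
    (hdone.separated hhand.objOut).transfer hdone.vorbis.config (he.sub (by decide)) hk hfy hobj
      (fun B hR => hdone.reads_ne_obj hhand.objOut hR) (fun C hC => hdone.buf_ne_obj hhand.objOut hC)
  -- the sample buffers are arena blocks
  have hbuf : ∀ C, SampleBuf (RunBlk (A.1.pushSetup Off.sizeof.stb_vorbis) len) m2 fw.toNat C →
      C.size = 0 ∨ (A.1.pushSetup Off.sizeof.stb_vorbis).Blk C := by
    intro C hC
    have hC' := SampleBuf.back (he.sub (by decide)) hdone.vorbis.config.header.HD1.2 hfy hC
    rcases hdone.buf_arena hC' with h0 | hb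
    · exact Or.inl h0
    · exact Or.inr (hb.mono hextP)
  -- every block the configuration reads is an arena block
  have hreads : ∀ B, ConfigOK.Reads m2 fw.toNat B → (A.1.pushSetup Off.sizeof.stb_vorbis).Blk B :=
    readsArena_transfer hdone.vorbis.config (he.sub (by decide)) hk (fun B hR => (hdone.reads_arena hR).mono hextP)
  have hcon2 : Consts m2 := om_consts2 spw fw A.1.S mem0 m1 m2 hcon hsp1 hfw hY hZ
  obtain ⟨ysz, hy⟩ := DecodeInv.exists_ysz hcfg.finalY
  exact ⟨ysz, ⟨henv, hvorb, hado, Int.le_refl 0, Int.le_refl 0⟩, hsep, hand2, hself, hbuf, hcon2, hy, hreads⟩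

end Vorbis.Spec.stb_vorbis_open_memory

/-- `stb_vorbis_open_memory` satisfies its contract. The machine part is `om_reduce` (Lemmas.lean: one lemma per returned callee
state, entry → cut1 → cut2 → (failing arm → `ret`) | (cut4 → cut5 → `ret`)); the pure part — SD.12 → P5 → the decode-time
invariant of the arena copy after `*f = p` (0x119b40, stb_vorbis_fixed.c:5142) — is `om_pure` above. -/
theorem Vorbis.Spec.Worked.stb_vorbis_open_memory_ok : Vorbis.Spec.stb_vorbis_open_memory.Statement := by
  unfold Vorbis.Spec.stb_vorbis_open_memory.Statement
  intro Lay hLay μ hμ u₀ hcode h_init h_sd h_alloc h_storeN h_memcpy h_pump h_store4 h_deinit others frames len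
  exact Vorbis.Spec.stb_vorbis_open_memory.om_reduce Lay hLay μ hμ u₀ hcode h_init h_sd h_alloc h_storeN h_memcpy h_store4
    h_deinit h_pump Vorbis.Spec.stb_vorbis_open_memory.om_pure others frames len
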